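-- pv_equiv track=rewrite | github.com/noeltiju/Semester-1 | Assignment2/q2.py | course_title_checker
-- ===== SOURCE A (Python) =====
-- def course_title_checker(title): #Checks if the input course title is valid
--     sub1 = ""
--     sub2 = ""
--     status = True
--     for i in range(len(title)):
--
--         if status:
--             sub1+=title[i]
--         else:
--             sub2+=title[i]
--
--         if i != len(title)-1:
--             if title[i+1] in "123456789":
--                 status = False
--     if sub1.isupper() and sub2.isnumeric():
--         return True
--
--     return False
-- ===== SOURCE B (Python) =====
-- def course_title_checker(title):  # simpler: find the split index once, then one slice test each side
--     p = len(title)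
--     for i in range(1, len(title)):
--         if title[i] in "123456789":
--             p = i
--             break
--     return title[:p].isupper() and title[p:].isnumeric()
-- ===== Notes on version B (the rewrite author's own statement) =====
-- stated objective: simpler
-- what changed: B computes the split index with a single break-on-first-digit scan and then tests the two slices with title[:p].isupper() and title[p:].isnumeric(), discarding A's two character-accumulator strings and the status flag; avoiding per-character string concatenation is the constant-factor win.
import Mathlib
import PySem

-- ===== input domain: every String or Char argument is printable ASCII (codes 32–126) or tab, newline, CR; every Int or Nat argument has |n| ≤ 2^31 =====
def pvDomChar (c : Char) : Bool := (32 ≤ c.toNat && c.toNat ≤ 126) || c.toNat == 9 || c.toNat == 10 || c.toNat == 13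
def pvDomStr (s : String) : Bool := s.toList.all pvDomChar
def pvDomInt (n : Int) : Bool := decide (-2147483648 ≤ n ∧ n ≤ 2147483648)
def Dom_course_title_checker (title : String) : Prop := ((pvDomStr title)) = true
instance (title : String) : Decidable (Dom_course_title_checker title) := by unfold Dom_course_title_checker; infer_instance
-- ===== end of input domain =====

-- B replaces A's two accumulator strings + status flag by one split-index scan and two slice tests; objective: simpler.

-- shared helpers: the character tests both Pythons use
-- `c in "123456789"` for a single character c
def pvInDigits19 (c : Char) : Bool := ("123456789".toList).contains c
-- str.isupper(): at least one cased character and no lowercase one — exact on the printable-ASCII domain,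
-- where the cased characters are exactly the letters
def pvIsUpper (cs : List Char) : Bool :=
  (cs.any (fun c => PySem.Chars.isalpha c)) && (cs.all (fun c => !(PySem.Chars.islower c)))
-- str.isnumeric(): nonempty and all numeric — exact on the printable-ASCII domain, where the numeric
-- characters are exactly the digits '0'-'9'
def pvIsNumeric (cs : List Char) : Bool :=
  (!cs.isEmpty) && cs.all (fun c => PySem.Chars.isdigit c)

-- ===== PORT A =====
-- one loop iteration of A: append title[i] to sub1 or sub2 depending on status, then the lookahead check
def pvStepA (cs : List Char) (acc : List Char × List Char × Bool) (i : Nat) : List Char × List Char × Bool :=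
  let c := cs.getD i ' '
  let sub1 := if acc.2.2 then acc.1 ++ [c] else acc.1
  let sub2 := if acc.2.2 then acc.2.1 else acc.2.1 ++ [c]
  let status :=
    if i ≠ cs.length - 1 then
      (if pvInDigits19 (cs.getD (i+1) ' ') then false else acc.2.2)
    else acc.2.2
  (sub1, sub2, status)

def course_title_checker (title : String) : Bool :=
  let cs := title.toList
  let r := (List.range cs.length).foldl (pvStepA cs) ([], [], true)
  if pvIsUpper r.1 && pvIsNumeric r.2.1 then true else false

-- ===== PORT B =====
-- the break-on-first-digit scan of Source B, starting at index 1; returns len(title) if no digit 1-9 found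
def pvFindAux : List Char → Nat → Nat
  | [], k => k
  | c :: rest, k => if pvInDigits19 c then k else pvFindAux rest (k+1)

def pvFindP (cs : List Char) : Nat :=
  match cs with
  | [] => 0
  | _ :: rest => pvFindAux rest 1

def course_title_checker_alt (title : String) : Bool :=
  let cs := title.toList
  let p := pvFindP cs
  pvIsUpper (cs.take p) && pvIsNumeric (cs.drop p)

-- ===== PRECONDITION & SPEC =====
def Spec_course_title_checker (title : String) (out : Bool) : Prop := out = course_title_checker_alt title
instance (title : String) (out : Bool) : Decidable (Spec_course_title_checker title out) := by unfold Spec_course_title_checker; infer_instance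

-- ===== CLAIM (what is proved, stated in full; the proofs are below) =====
def Claim_equal_course_title_checker : Prop := ∀ (title : String), Dom_course_title_checker title → Spec_course_title_checker title (course_title_checker title)

-- ===== LEMMAS AND PROOFS =====

-- properties of the split index p = pvFindP cs
theorem pvFindAux_ge (rest : List Char) (k : Nat) : k ≤ pvFindAux rest k := by
  induction rest generalizing k with
  | nil => simp [pvFindAux]
  | cons c t ih =>
    simp only [pvFindAux]
    split
    · exact le_refl _
    · exact le_trans (Nat.le_succ k) (ih (k+1))

theorem pvFindAux_le (rest : List Char) (k : Nat) : pvFindAux rest k ≤ k + rest.length := by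
  induction rest generalizing k with
  | nil => simp [pvFindAux]
  | cons c t ih =>
    simp only [pvFindAux]
    split
    · omega
    · have := ih (k+1); simpa [Nat.add_comm, Nat.add_left_comm] using this.trans (by omega)

theorem pvFindAux_digit (rest : List Char) (k : Nat)
    (h : pvFindAux rest k < k + rest.length) :
    pvInDigits19 (rest.getD (pvFindAux rest k - k) ' ') = true := by
  induction rest generalizing k with
  | nil => simp [pvFindAux] at h
  | cons c t ih =>
    simp only [pvFindAux] at *
    by_cases hc : pvInDigits19 c = true
    · simp [hc]
    · simp only [hc, if_neg, Bool.not_eq_true] at *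
      have hge := pvFindAux_ge t (k+1)
      have h' : pvFindAux t (k+1) < (k+1) + t.length := by
        simp [List.length_cons] at h; omega
      have := ih (k+1) h'
      have hidx : pvFindAux t (k+1) - k = (pvFindAux t (k+1) - (k+1)) + 1 := by omega
      rw [hidx, List.getD_cons_succ]
      exact this

theorem pvFindAux_min (rest : List Char) (k j : Nat)
    (hk : k ≤ j) (hj : j < pvFindAux rest k) :
    pvInDigits19 (rest.getD (j - k) ' ') = false := by
  induction rest generalizing k with
  | nil =>
    simp [pvFindAux] at hj; omega
  | cons c t ih =>
    simp only [pvFindAux] at hj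
    by_cases hc : pvInDigits19 c = true
    · simp [hc] at hj; omega
    · simp only [hc, if_neg, Bool.not_eq_true] at hj ⊢
      by_cases hjk : j = k
      · subst hjk; simpa using (by simpa using hc)
      · have hidx : j - k = (j - (k+1)) + 1 := by omega
        rw [hidx, List.getD_cons_succ]
        exact ih (k+1) (by omega) hj

theorem pvFindP_le (cs : List Char) : pvFindP cs ≤ cs.length := by
  cases cs with
  | nil => simp [pvFindP]
  | cons c t => simpa [pvFindP, Nat.add_comm] using pvFindAux_le t 1

theorem pvFindP_pos (cs : List Char) (h : cs ≠ []) : 1 ≤ pvFindP cs := by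
  cases cs with
  | nil => simp at h
  | cons c t => exact pvFindAux_ge t 1

theorem pvFindP_digit (cs : List Char) (h : pvFindP cs < cs.length) :
    pvInDigits19 (cs.getD (pvFindP cs) ' ') = true := by
  cases cs with
  | nil => simp at h
  | cons c t =>
    have h1 : 1 ≤ pvFindAux t 1 := pvFindAux_ge t 1
    have h' : pvFindAux t 1 < 1 + t.length := by
      simpa [pvFindP, List.length_cons, Nat.add_comm] using h
    have := pvFindAux_digit t 1 h'
    have hidx : pvFindP (c :: t) = (pvFindAux t 1 - 1) + 1 := by
      simp [pvFindP]; omega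
    rw [hidx, List.getD_cons_succ]
    exact this

theorem pvFindP_min (cs : List Char) (j : Nat) (h1 : 1 ≤ j) (hj : j < pvFindP cs) :
    pvInDigits19 (cs.getD j ' ') = false := by
  cases cs with
  | nil => simp [pvFindP] at hj
  | cons c t =>
    have hidx : j = (j - 1) + 1 := by omega
    rw [hidx, List.getD_cons_succ]
    exact pvFindAux_min t 1 (j) h1 (by simpa [pvFindP] using hj)

-- loop invariant state of A after processing indices 0..j-1
def pState (cs : List Char) (j : Nat) : List Char × List Char × Bool :=
  (cs.take (min j (pvFindP cs)),
   (cs.drop (pvFindP cs)).take (j - pvFindP cs),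
   decide (j < pvFindP cs ∨ pvFindP cs = cs.length))

theorem take_succ_getD (cs : List Char) (j : Nat) (hj : j < cs.length) :
    cs.take j ++ [cs.getD j ' '] = cs.take (j+1) := by
  rw [List.take_succ]
  simp [List.getD_eq_getElem?_getD, List.getElem?_eq_getElem hj]

theorem pState_step (cs : List Char) (j : Nat) (hj : j < cs.length) :
    pvStepA cs (pState cs j) j = pState cs (j+1) := by
  have hple := pvFindP_le cs
  unfold pvStepA pState
  simp only [Prod.mk.injEq]
  refine ⟨?_, ?_, ?_⟩
  · -- sub1
    by_cases hjp : j < pvFindP cs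
    · have hst : decide (j < pvFindP cs ∨ pvFindP cs = cs.length) = true := by
        simp; omega
      rw [hst]
      have h1 : min j (pvFindP cs) = j := by omega
      have h2 : min (j+1) (pvFindP cs) = j + 1 := by omega
      simp only [if_pos rfl, h1, h2]
      simpa using take_succ_getD cs j hj
    · have hst : decide (j < pvFindP cs ∨ pvFindP cs = cs.length) = false := by
        simp; omega
      rw [hst]
      have h1 : min j (pvFindP cs) = pvFindP cs := by omega
      have h2 : min (j+1) (pvFindP cs) = pvFindP cs := by omega
      simp [h1, h2]
  · -- sub2
    by_cases hjp : j < pvFindP cs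
    · have hst : decide (j < pvFindP cs ∨ pvFindP cs = cs.length) = true := by
        simp; omega
      rw [hst]
      have h1 : j - pvFindP cs = 0 := by omega
      have h2 : j + 1 - pvFindP cs = 0 := by omega
      simp [h1, h2]
    · have hst : decide (j < pvFindP cs ∨ pvFindP cs = cs.length) = false := by
        simp; omega
      rw [hst]
      have hlen : j - pvFindP cs < (cs.drop (pvFindP cs)).length := by
        simp; omega
      have h := take_succ_getD (cs.drop (pvFindP cs)) (j - pvFindP cs) hlen
      have hgd : (cs.drop (pvFindP cs)).getD (j - pvFindP cs) ' ' = cs.getD j ' ' := by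
        have hj' : pvFindP cs + (j - pvFindP cs) = j := by omega
        simp [List.getD_eq_getElem?_getD, List.getElem?_drop, hj']
      rw [hgd] at h
      have h2 : j + 1 - pvFindP cs = (j - pvFindP cs) + 1 := by omega
      simp only [Bool.false_eq_true, if_neg, ite_false, h2]
      simpa using h
  · -- status
    by_cases hlast : j = cs.length - 1
    · have hj1 : ¬ (j ≠ cs.length - 1) := by omega
      simp only [if_neg hj1]
      rw [decide_eq_decide]
      omega
    · have hj1 : j + 1 < cs.length := by omega
      simp only [if_pos (by omega : j ≠ cs.length - 1)]
      by_cases hd : pvInDigits19 (cs.getD (j+1) ' ') = true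
      · have hp_le : pvFindP cs ≤ j + 1 := by
          by_contra hlt
          push_neg at hlt
          have := pvFindP_min cs (j+1) (by omega) hlt
          rw [hd] at this
          simp at this
        simp only [hd, if_pos rfl]
        symm
        simp
        omega
      · simp only [Bool.not_eq_true] at hd
        simp only [hd, Bool.false_eq_true, if_neg, ite_false]
        rw [decide_eq_decide]
        have hne : pvFindP cs ≠ j + 1 := by
          intro h
          have hdig := pvFindP_digit cs (by omega)
          rw [h, hd] at hdig
          simp at hdig
        omega

theorem pState_loop (cs : List Char) (m j : Nat) (h : j + m = cs.length) :
    (List.range' j m).foldl (pvStepA cs) (pState cs j) = pState cs cs.length := by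
  induction m generalizing j with
  | zero => simp at h; subst h; simp
  | succ m ih =>
    rw [List.range'_succ, List.foldl_cons, pState_step cs j (by omega)]
    exact ih (j+1) (by omega)

theorem pvMain_eq (cs : List Char) :
    (if pvIsUpper ((List.range cs.length).foldl (pvStepA cs) ([], [], true)).1 &&
        pvIsNumeric ((List.range cs.length).foldl (pvStepA cs) ([], [], true)).2.1 then true else false)
      = (pvIsUpper (cs.take (pvFindP cs)) && pvIsNumeric (cs.drop (pvFindP cs))) := by
  have hinit : (([], [], true) : List Char × List Char × Bool) = pState cs 0 := by
    unfold pState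
    rcases eq_or_ne cs [] with h | h
    · subst h; simp [pvFindP]
    · have := pvFindP_pos cs h
      simp
      omega
  rw [List.range_eq_range', hinit, pState_loop cs cs.length 0 (by omega)]
  unfold pState
  have hple := pvFindP_le cs
  have h1 : min cs.length (pvFindP cs) = pvFindP cs := by omega
  have h2 : (cs.drop (pvFindP cs)).take (cs.length - pvFindP cs) = cs.drop (pvFindP cs) := by
    apply List.take_of_length_le; simp
  simp only [h1, h2]
  cases hb : pvIsUpper (cs.take (pvFindP cs)) && pvIsNumeric (cs.drop (pvFindP cs)) <;> simp [hb]

-- ===== VERDICT (by name: the statement is the Claim_ definition above) =====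
theorem course_title_checker_spec : Claim_equal_course_title_checker := by
  intro title _
  unfold Spec_course_title_checker course_title_checker course_title_checker_alt
  exact pvMain_eq title.toList
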